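-- pv_equiv track=rewrite | github.com/GAURAV0440/AI-DDR-Report-Generator | test.py | attach_images
-- ===== SOURCE A (Python) =====
-- def map_images_to_areas(inspection_images):
--     area_map = {
--         "Hall": [],
--         "Bedroom": [],
--         "Master Bedroom": [],
--         "Kitchen": [],
--         "Bathroom": [],
--         "Parking": [],
--         "External Wall": []
--     }
--
--     for img in inspection_images:
--         name = img.lower()
--
--         if "page3" in name:
--             area_map["Hall"].append(img)
--
--         elif "page4" in name:
--             area_map["Bedroom"].append(img)
--
--         elif "page5" in name:
--             area_map["Master Bedroom"].append(img)
--
--         elif "page6" in name: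
--             area_map["Bathroom"].append(img)
--
--         elif "page7" in name:
--             area_map["Kitchen"].append(img)
--
--         elif "page8" in name:
--             area_map["External Wall"].append(img)
--
--         elif "page9" in name:
--             area_map["Parking"].append(img)
--
--     return area_map
--
-- def attach_images(ddr_text, inspection_images, thermal_images):
--     area_map = map_images_to_areas(inspection_images)
--
--     image_section = "\n\n---\n## 📸 Area-wise Supporting Images\n\n"
--
--     for area, imgs in area_map.items():
--         image_section += f"\n### {area}\n"
--
--         if imgs:
--             for img in imgs[:2]:  # limit for cleanliness
--                 image_section += f"- {img}\n"
--         else: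
--             image_section += "- Image Not Available\n"
--
--     # Add thermal images separately
--     image_section += "\n### Thermal Images\n"
--     if thermal_images:
--         for img in thermal_images[:5]:
--             image_section += f"- {img}\n"
--     else:
--         image_section += "- Image Not Available\n"
--
--     return ddr_text + image_section
-- ===== SOURCE B (Python) =====
-- # Idiomatic rewrite: classify each image once via an ordered lookup table
-- # (first matching page marker wins), then emit each area section by filtering
-- # the labeled list -- no mutable per-area buckets, string built via join.
--
-- AREA_PAGES = [
--     ("Hall", "page3"),
--     ("Bedroom", "page4"),
--     ("Master Bedroom", "page5"),
--     ("Bathroom", "page6"),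
--     ("Kitchen", "page7"),
--     ("External Wall", "page8"),
--     ("Parking", "page9"),
-- ]
--
-- OUTPUT_ORDER = ["Hall", "Bedroom", "Master Bedroom", "Kitchen",
--                 "Bathroom", "Parking", "External Wall"]
--
--
-- def _area_of(img):
--     name = img.lower()
--     return next((area for area, page in AREA_PAGES if page in name), None)
--
--
-- def _bullets(imgs):
--     if not imgs:
--         return "- Image Not Available\n"
--     return "".join(f"- {img}\n" for img in imgs)
--
--
-- def attach_images(ddr_text, inspection_images, thermal_images):
--     labeled = [(img, _area_of(img)) for img in inspection_images]
--     parts = ["\n\n---\n## 📸 Area-wise Supporting Images\n\n"]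
--     for area in OUTPUT_ORDER:
--         imgs = [img for img, a in labeled if a == area]
--         parts.append(f"\n### {area}\n" + _bullets(imgs[:2]))
--     parts.append("\n### Thermal Images\n" + _bullets(thermal_images[:5]))
--     return ddr_text + "".join(parts)
-- ===== Notes on version B (the rewrite author's own statement) =====
-- stated objective: idiomatic
-- what changed: Replaced A's mutable per-area dict buckets filled through a 7-way if/elif chain by a one-pass classification (ordered area->page lookup table, first matching page marker wins) followed by a per-area filter over the labeled list, assembling the output from a parts list joined once instead of repeated string +=.
import Mathlib
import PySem

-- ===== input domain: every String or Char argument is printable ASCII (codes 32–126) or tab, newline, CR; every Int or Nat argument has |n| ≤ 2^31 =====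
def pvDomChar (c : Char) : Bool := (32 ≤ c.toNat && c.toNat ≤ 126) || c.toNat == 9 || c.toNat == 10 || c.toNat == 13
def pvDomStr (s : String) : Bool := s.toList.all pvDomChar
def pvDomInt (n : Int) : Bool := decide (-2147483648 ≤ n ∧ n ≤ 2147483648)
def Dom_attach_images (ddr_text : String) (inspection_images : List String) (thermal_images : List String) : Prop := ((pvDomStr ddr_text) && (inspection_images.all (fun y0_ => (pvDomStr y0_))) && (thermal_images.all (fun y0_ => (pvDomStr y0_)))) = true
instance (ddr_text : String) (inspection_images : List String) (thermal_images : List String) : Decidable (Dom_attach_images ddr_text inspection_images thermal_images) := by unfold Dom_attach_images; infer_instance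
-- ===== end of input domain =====

-- B replaces A's per-area mutable buckets (dict + if/elif chain) by a one-pass
-- classification via an ordered lookup table and a per-area filter; same output, idiomatic rewrite.


-- ===== PORT A =====
def map_images_to_areas (inspection_images : List String) : PySem.Dict String (List String) :=
  let area_map : PySem.Dict String (List String) :=
    PySem.Dict.mk [("Hall", []), ("Bedroom", []), ("Master Bedroom", []), ("Kitchen", []),
                   ("Bathroom", []), ("Parking", []), ("External Wall", [])]
  inspection_images.foldl (fun m img =>
    let name := PySem.Str.lower img
    if PySem.Str.isIn "page3" name then m.modify "Hall" [] (· ++ [img])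
    else if PySem.Str.isIn "page4" name then m.modify "Bedroom" [] (· ++ [img])
    else if PySem.Str.isIn "page5" name then m.modify "Master Bedroom" [] (· ++ [img])
    else if PySem.Str.isIn "page6" name then m.modify "Bathroom" [] (· ++ [img])
    else if PySem.Str.isIn "page7" name then m.modify "Kitchen" [] (· ++ [img])
    else if PySem.Str.isIn "page8" name then m.modify "External Wall" [] (· ++ [img])
    else if PySem.Str.isIn "page9" name then m.modify "Parking" [] (· ++ [img])
    else m) area_map

def attach_images (ddr_text : String) (inspection_images : List String) (thermal_images : List String) : String :=
  let area_map := map_images_to_areas inspection_images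
  let image_section := "\n\n---\n## 📸 Area-wise Supporting Images\n\n"
  let image_section := area_map.items.foldl (fun sec p =>
    let sec := sec ++ "\n### " ++ p.1 ++ "\n"
    if !p.2.isEmpty then
      (PySem.List.slice p.2 none (some 2)).foldl (fun s img => s ++ "- " ++ img ++ "\n") sec
    else sec ++ "- Image Not Available\n") image_section
  let image_section := image_section ++ "\n### Thermal Images\n"
  let image_section :=
    if !thermal_images.isEmpty then
      (PySem.List.slice thermal_images none (some 5)).foldl (fun s img => s ++ "- " ++ img ++ "\n") image_section
    else image_section ++ "- Image Not Available\n"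
  ddr_text ++ image_section

-- ===== PORT B =====
def pvAreaPages : List (String × String) :=
  [("Hall", "page3"), ("Bedroom", "page4"), ("Master Bedroom", "page5"), ("Bathroom", "page6"),
   ("Kitchen", "page7"), ("External Wall", "page8"), ("Parking", "page9")]

def pvOutputOrder : List String :=
  ["Hall", "Bedroom", "Master Bedroom", "Kitchen", "Bathroom", "Parking", "External Wall"]

def pvAreaOf (img : String) : Option String :=
  let name := PySem.Str.lower img
  (pvAreaPages.find? (fun ap => PySem.Str.isIn ap.2 name)).map (·.1)

def pvBullets (imgs : List String) : String :=
  if imgs.isEmpty then "- Image Not Available\n"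
  else PySem.Str.join "" (imgs.map (fun img => "- " ++ img ++ "\n"))

def attach_images_alt (ddr_text : String) (inspection_images : List String) (thermal_images : List String) : String :=
  let labeled := inspection_images.map (fun img => (img, pvAreaOf img))
  let parts := ["\n\n---\n## 📸 Area-wise Supporting Images\n\n"]
  let parts := pvOutputOrder.foldl (fun ps area =>
    let imgs := (labeled.filter (fun p => p.2 == some area)).map (·.1)
    ps ++ ["\n### " ++ area ++ "\n" ++ pvBullets (PySem.List.slice imgs none (some 2))]) parts
  let parts := parts ++ ["\n### Thermal Images\n" ++ pvBullets (PySem.List.slice thermal_images none (some 5))]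
  ddr_text ++ PySem.Str.join "" parts

-- ===== PRECONDITION & SPEC =====
def Spec_attach_images (ddr_text : String) (inspection_images : List String) (thermal_images : List String) (out : String) : Prop := out = attach_images_alt ddr_text inspection_images thermal_images
instance (ddr_text : String) (inspection_images : List String) (thermal_images : List String) (out : String) : Decidable (Spec_attach_images ddr_text inspection_images thermal_images out) := by unfold Spec_attach_images; infer_instance

-- ===== CLAIM (what is proved, stated in full; the proofs are below) =====
def Claim_equal_attach_images : Prop := ∀ (ddr_text : String) (inspection_images : List String) (thermal_images : List String), Dom_attach_images ddr_text inspection_images thermal_images → Spec_attach_images ddr_text inspection_images thermal_images (attach_images ddr_text inspection_images thermal_images)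

-- ===== LEMMAS AND PROOFS =====

-- the images B's filter selects for a given area
def pvSel (area : String) (xs : List String) : List String :=
  xs.filter (fun i => pvAreaOf i == some area)

-- "".join distributes over cons
theorem pv_join_cons (a : String) (l : List String) :
    PySem.Str.join "" (a :: l) = a ++ PySem.Str.join "" l := by
  cases l with
  | nil => simp [PySem.Str.join, PySem.Chars.join_singleton, String.ofList_toList]
  | cons b t =>
    simp only [PySem.Str.join, List.map, PySem.Chars.join_cons_cons]
    simp [String.ofList_append, String.ofList_toList]

theorem pv_join_nil : PySem.Str.join "" ([] : List String) = "" := by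
  simp [PySem.Str.join, PySem.Chars.join_nil]

-- A's bullet loop equals init ++ "".join of the bullet lines
theorem pv_strfold (l : List String) (init : String) :
    l.foldl (fun s img => s ++ "- " ++ img ++ "\n") init
      = init ++ PySem.Str.join "" (l.map (fun img => "- " ++ img ++ "\n")) := by
  induction l generalizing init with
  | nil => simp [pv_join_nil]
  | cons x t ih =>
    simp only [List.foldl_cons, List.map, pv_join_cons, ih]
    simp [String.append_assoc]

-- A's per-block emission equals init ++ B's bullet block
theorem pv_emit_eq (b : Int) (hb : 0 < b) (l : List String) (init : String) :
    (if !l.isEmpty then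
        (PySem.List.slice l none (some b)).foldl (fun s img => s ++ "- " ++ img ++ "\n") init
      else init ++ "- Image Not Available\n")
      = init ++ pvBullets (PySem.List.slice l none (some b)) := by
  rw [PySem.List.slice_to l (le_of_lt hb)]
  cases l with
  | nil => simp [pvBullets]
  | cons x t =>
    have hpos : b.toNat ≠ 0 := by omega
    have : (List.take b.toNat (x :: t)).isEmpty = false := by
      cases hbn : b.toNat with
      | zero => exact absurd hbn hpos
      | succ m => simp [List.take]
    simp only [List.isEmpty_cons, Bool.not_false, if_pos, pvBullets, this, Bool.false_eq_true,
      if_false, pv_strfold]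

-- pvSel over a cons splits off the head's contribution
theorem pvSel_cons (area x : String) (t : List String) :
    pvSel area (x :: t) = pvSel area [x] ++ pvSel area t := by
  by_cases hx : pvAreaOf x == some area <;> simp [pvSel, hx]

-- one step of A's bucket loop, on the literal 7-bucket dict (simp-normal form of the loop body)
theorem pv_step (x : String) (h b mb k ba p e : List String) :
    (if PySem.Str.isIn "page3" (PySem.Str.lower x) = true then (PySem.Dict.mk [("Hall", h), ("Bedroom", b), ("Master Bedroom", mb), ("Kitchen", k), ("Bathroom", ba), ("Parking", p), ("External Wall", e)]).modify "Hall" [] (fun l => l ++ [x])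
     else if PySem.Str.isIn "page4" (PySem.Str.lower x) = true then (PySem.Dict.mk [("Hall", h), ("Bedroom", b), ("Master Bedroom", mb), ("Kitchen", k), ("Bathroom", ba), ("Parking", p), ("External Wall", e)]).modify "Bedroom" [] (fun l => l ++ [x])
     else if PySem.Str.isIn "page5" (PySem.Str.lower x) = true then (PySem.Dict.mk [("Hall", h), ("Bedroom", b), ("Master Bedroom", mb), ("Kitchen", k), ("Bathroom", ba), ("Parking", p), ("External Wall", e)]).modify "Master Bedroom" [] (fun l => l ++ [x])
     else if PySem.Str.isIn "page6" (PySem.Str.lower x) = true then (PySem.Dict.mk [("Hall", h), ("Bedroom", b), ("Master Bedroom", mb), ("Kitchen", k), ("Bathroom", ba), ("Parking", p), ("External Wall", e)]).modify "Bathroom" [] (fun l => l ++ [x])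
     else if PySem.Str.isIn "page7" (PySem.Str.lower x) = true then (PySem.Dict.mk [("Hall", h), ("Bedroom", b), ("Master Bedroom", mb), ("Kitchen", k), ("Bathroom", ba), ("Parking", p), ("External Wall", e)]).modify "Kitchen" [] (fun l => l ++ [x])
     else if PySem.Str.isIn "page8" (PySem.Str.lower x) = true then (PySem.Dict.mk [("Hall", h), ("Bedroom", b), ("Master Bedroom", mb), ("Kitchen", k), ("Bathroom", ba), ("Parking", p), ("External Wall", e)]).modify "External Wall" [] (fun l => l ++ [x])
     else if PySem.Str.isIn "page9" (PySem.Str.lower x) = true then (PySem.Dict.mk [("Hall", h), ("Bedroom", b), ("Master Bedroom", mb), ("Kitchen", k), ("Bathroom", ba), ("Parking", p), ("External Wall", e)]).modify "Parking" [] (fun l => l ++ [x])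
     else PySem.Dict.mk [("Hall", h), ("Bedroom", b), ("Master Bedroom", mb), ("Kitchen", k), ("Bathroom", ba), ("Parking", p), ("External Wall", e)])
    = PySem.Dict.mk [("Hall", h ++ pvSel "Hall" [x]), ("Bedroom", b ++ pvSel "Bedroom" [x]), ("Master Bedroom", mb ++ pvSel "Master Bedroom" [x]), ("Kitchen", k ++ pvSel "Kitchen" [x]), ("Bathroom", ba ++ pvSel "Bathroom" [x]), ("Parking", p ++ pvSel "Parking" [x]), ("External Wall", e ++ pvSel "External Wall" [x])] := by
  have hsel : ∀ area : String, pvSel area [x]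
      = if pvAreaOf x == some area then [x] else [] := by
    intro area; by_cases hx : pvAreaOf x == some area <;> simp [pvSel, hx]
  by_cases h3 : PySem.Chars.isIn ['p', 'a', 'g', 'e', '3'] (PySem.Chars.lower x.toList) = true
  · have hv : pvAreaOf x = some "Hall" := by
      simp [pvAreaOf, pvAreaPages, h3]
    simp [h3, hsel, hv, PySem.Dict.modify, PySem.Dict.insert, PySem.Dict.getD, PySem.Dict.get?]
  by_cases h4 : PySem.Chars.isIn ['p', 'a', 'g', 'e', '4'] (PySem.Chars.lower x.toList) = true
  · have hv : pvAreaOf x = some "Bedroom" := by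
      simp [pvAreaOf, pvAreaPages, List.find?, h3, h4]
    simp [h3, h4, hsel, hv, PySem.Dict.modify, PySem.Dict.insert, PySem.Dict.getD, PySem.Dict.get?]
  by_cases h5 : PySem.Chars.isIn ['p', 'a', 'g', 'e', '5'] (PySem.Chars.lower x.toList) = true
  · have hv : pvAreaOf x = some "Master Bedroom" := by
      simp [pvAreaOf, pvAreaPages, List.find?, h3, h4, h5]
    simp [h3, h4, h5, hsel, hv, PySem.Dict.modify, PySem.Dict.insert, PySem.Dict.getD, PySem.Dict.get?]
  by_cases h6 : PySem.Chars.isIn ['p', 'a', 'g', 'e', '6'] (PySem.Chars.lower x.toList) = true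
  · have hv : pvAreaOf x = some "Bathroom" := by
      simp [pvAreaOf, pvAreaPages, List.find?, h3, h4, h5, h6]
    simp [h3, h4, h5, h6, hsel, hv, PySem.Dict.modify, PySem.Dict.insert, PySem.Dict.getD, PySem.Dict.get?]
  by_cases h7 : PySem.Chars.isIn ['p', 'a', 'g', 'e', '7'] (PySem.Chars.lower x.toList) = true
  · have hv : pvAreaOf x = some "Kitchen" := by
      simp [pvAreaOf, pvAreaPages, List.find?, h3, h4, h5, h6, h7]
    simp [h3, h4, h5, h6, h7, hsel, hv, PySem.Dict.modify, PySem.Dict.insert, PySem.Dict.getD, PySem.Dict.get?]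
  by_cases h8 : PySem.Chars.isIn ['p', 'a', 'g', 'e', '8'] (PySem.Chars.lower x.toList) = true
  · have hv : pvAreaOf x = some "External Wall" := by
      simp [pvAreaOf, pvAreaPages, List.find?, h3, h4, h5, h6, h7, h8]
    simp [h3, h4, h5, h6, h7, h8, hsel, hv, PySem.Dict.modify, PySem.Dict.insert, PySem.Dict.getD, PySem.Dict.get?]
  by_cases h9 : PySem.Chars.isIn ['p', 'a', 'g', 'e', '9'] (PySem.Chars.lower x.toList) = true
  · have hv : pvAreaOf x = some "Parking" := by
      simp [pvAreaOf, pvAreaPages, List.find?, h3, h4, h5, h6, h7, h8, h9]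
    simp [h3, h4, h5, h6, h7, h8, h9, hsel, hv, PySem.Dict.modify, PySem.Dict.insert, PySem.Dict.getD, PySem.Dict.get?]
  · have hv : pvAreaOf x = none := by
      simp [pvAreaOf, pvAreaPages, List.find?, h3, h4, h5, h6, h7, h8, h9]
    simp [h3, h4, h5, h6, h7, h8, h9, hsel, hv]

-- the loop of map_images_to_areas, from a general 7-bucket state
theorem pv_loop (xs : List String) (h b mb k ba p e : List String) :
    xs.foldl (fun m img =>
      let name := PySem.Str.lower img
      if PySem.Str.isIn "page3" name then m.modify "Hall" [] (· ++ [img])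
      else if PySem.Str.isIn "page4" name then m.modify "Bedroom" [] (· ++ [img])
      else if PySem.Str.isIn "page5" name then m.modify "Master Bedroom" [] (· ++ [img])
      else if PySem.Str.isIn "page6" name then m.modify "Bathroom" [] (· ++ [img])
      else if PySem.Str.isIn "page7" name then m.modify "Kitchen" [] (· ++ [img])
      else if PySem.Str.isIn "page8" name then m.modify "External Wall" [] (· ++ [img])
      else if PySem.Str.isIn "page9" name then m.modify "Parking" [] (· ++ [img])
      else m)
      (PySem.Dict.mk [("Hall", h), ("Bedroom", b), ("Master Bedroom", mb), ("Kitchen", k), ("Bathroom", ba), ("Parking", p), ("External Wall", e)])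
    = PySem.Dict.mk [("Hall", h ++ pvSel "Hall" xs), ("Bedroom", b ++ pvSel "Bedroom" xs), ("Master Bedroom", mb ++ pvSel "Master Bedroom" xs), ("Kitchen", k ++ pvSel "Kitchen" xs), ("Bathroom", ba ++ pvSel "Bathroom" xs), ("Parking", p ++ pvSel "Parking" xs), ("External Wall", e ++ pvSel "External Wall" xs)] := by
  induction xs generalizing h b mb k ba p e with
  | nil => simp [pvSel]
  | cons x t ih =>
    simp only [List.foldl_cons]
    rw [pv_step, ih]
    congr 1
    simp [pvSel_cons _ x t, List.append_assoc]

-- B's filtered projection is pvSel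
theorem pv_labeled_filter (xs : List String) (area : String) :
    ((xs.map (fun img => (img, pvAreaOf img))).filter (fun p => p.2 == some area)).map (·.1)
      = pvSel area xs := by
  induction xs with
  | nil => rfl
  | cons x t ih =>
    by_cases hx : pvAreaOf x == some area <;> simp [hx, ih, pvSel]

-- ===== VERDICT (by name: the statement is the Claim_ definition above) =====
set_option maxRecDepth 8192 in
theorem attach_images_spec : Claim_equal_attach_images := by
  intro ddr insp th _
  show attach_images ddr insp th = attach_images_alt ddr insp th
  unfold attach_images attach_images_alt map_images_to_areas
  rw [pv_loop]
  simp only [pvOutputOrder, List.foldl_cons, List.foldl_nil,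
    pv_labeled_filter, List.nil_append]
  rw [pv_emit_eq 2 (by norm_num), pv_emit_eq 2 (by norm_num), pv_emit_eq 2 (by norm_num),
    pv_emit_eq 2 (by norm_num), pv_emit_eq 2 (by norm_num), pv_emit_eq 2 (by norm_num),
    pv_emit_eq 2 (by norm_num), pv_emit_eq 5 (by norm_num)]
  refine String.toList_inj.mp ?_
  simp [pv_join_cons, pv_join_nil, String.toList_append, List.append_assoc]
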